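-- pv_equiv track=rewrite | github.com/f-giacobbe/fondamenti1 | Tutoraggio 2/applicazione_ordini.py | spesa_totale
-- ===== SOURCE A (Python) =====
-- def spesa_totale(CL, OR, cognome):
--     codici_clienti = []
--
--     #mi salvo i codici dei clienti con cognome "cognome"
--     for i in range(len(CL)):
--         if CL[i][1].lower() == cognome.lower():
--             codici_clienti.append(CL[i][0])
--
--
--     totale = 0
--
--     for i in range(len(OR)):
--         if OR[i][1] in codici_clienti:
--             totale += OR[i][2]
--
--
--     return totale
-- ===== SOURCE B (Python) =====
-- def spesa_totale(CL, OR, cognome):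
--     # One pass over OR aggregating spend per client code, then one pass over CL
--     # summing the aggregates of the distinct codes whose surname matches.
--     spesa_per_codice = {}
--     for _, codice, importo in OR:
--         spesa_per_codice[codice] = spesa_per_codice.get(codice, 0) + importo
--     target = cognome.lower()
--     codici = {codice for codice, cogn in CL if cogn.lower() == target}
--     return sum(spesa_per_codice.get(c, 0) for c in codici)
-- ===== Notes on version B (the rewrite author's own statement) =====
-- stated objective: faster
-- what changed: Replaces the per-order linear scan of the matched-code list by a one-pass dict aggregating spend per code plus a set of distinct matched codes summed over once.
import Mathlib
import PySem

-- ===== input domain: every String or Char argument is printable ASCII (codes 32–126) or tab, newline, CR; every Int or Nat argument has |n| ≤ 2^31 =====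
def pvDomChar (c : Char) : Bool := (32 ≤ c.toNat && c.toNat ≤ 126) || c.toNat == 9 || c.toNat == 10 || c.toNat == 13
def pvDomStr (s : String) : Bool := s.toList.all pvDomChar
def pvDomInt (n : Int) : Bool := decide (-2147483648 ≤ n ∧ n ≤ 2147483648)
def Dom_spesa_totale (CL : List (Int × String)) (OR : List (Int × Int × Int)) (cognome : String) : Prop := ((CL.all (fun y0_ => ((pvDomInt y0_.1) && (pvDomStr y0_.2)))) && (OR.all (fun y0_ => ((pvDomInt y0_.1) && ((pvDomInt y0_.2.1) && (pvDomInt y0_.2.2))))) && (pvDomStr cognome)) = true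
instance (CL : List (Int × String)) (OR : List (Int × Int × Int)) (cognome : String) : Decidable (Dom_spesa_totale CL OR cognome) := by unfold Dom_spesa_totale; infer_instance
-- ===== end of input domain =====

-- B aggregates order totals per client code in one dict pass and sums over the distinct
-- matching codes, replacing A's inner membership scan of the matched-code list.

-- ===== PORT A =====
def spesa_totale (CL : List (Int × String)) (OR : List (Int × Int × Int)) (cognome : String) : Int :=
  let codici_clienti : List Int :=
    (PySem.List.pyRange 0 (CL.length : Int) 1).foldl
      (fun acc i =>
        if PySem.Str.lower (PySem.List.pyGetD CL i (0, "")).2 == PySem.Str.lower cognome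
        then acc ++ [(PySem.List.pyGetD CL i (0, "")).1] else acc) []
  (PySem.List.pyRange 0 (OR.length : Int) 1).foldl
    (fun totale i =>
      if codici_clienti.contains (PySem.List.pyGetD OR i (0, 0, 0)).2.1
      then totale + (PySem.List.pyGetD OR i (0, 0, 0)).2.2 else totale) 0

-- ===== PORT B =====
def spesa_totale_alt (CL : List (Int × String)) (OR : List (Int × Int × Int)) (cognome : String) : Int :=
  let spesa_per_codice : PySem.Dict Int Int :=
    OR.foldl (fun d o => d.insert o.2.1 (d.getD o.2.1 0 + o.2.2)) PySem.Dict.empty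
  let target := PySem.Str.lower cognome
  let codici : PySem.Set Int :=
    PySem.Set.ofList ((CL.filter (fun c => PySem.Str.lower c.2 == target)).map (·.1))
  (codici.map (fun c => spesa_per_codice.getD c 0)).sum

-- ===== PRECONDITION & SPEC =====
def Spec_spesa_totale (CL : List (Int × String)) (OR : List (Int × Int × Int)) (cognome : String) (out : Int) : Prop := out = spesa_totale_alt CL OR cognome
instance (CL : List (Int × String)) (OR : List (Int × Int × Int)) (cognome : String) (out : Int) : Decidable (Spec_spesa_totale CL OR cognome out) := by unfold Spec_spesa_totale; infer_instance

-- ===== CLAIM (what is proved, stated in full; the proofs are below) =====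
def Claim_equal_spesa_totale : Prop := ∀ (CL : List (Int × String)) (OR : List (Int × Int × Int)) (cognome : String), Dom_spesa_totale CL OR cognome → Spec_spesa_totale CL OR cognome (spesa_totale CL OR cognome)

-- ===== LEMMAS AND PROOFS =====

-- summing `f + indicator of k` over a nodup list
theorem sum_map_add_indicator (S : List Int) (hS : S.Nodup) (f : Int → Int) (k v : Int) :
    (S.map (fun c => f c + if c = k then v else 0)).sum
      = (S.map f).sum + (if k ∈ S then v else 0) := by
  induction S with
  | nil => simp
  | cons a S ih =>
    rcases List.nodup_cons.mp hS with ⟨ha, hS'⟩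
    by_cases hak : a = k
    · subst hak
      simp only [List.map_cons, List.sum_cons, ih hS', List.mem_cons, true_or,
        if_pos, if_neg ha]
      ring
    · simp only [List.map_cons, List.sum_cons, ih hS', if_neg hak, List.mem_cons]
      rw [if_congr (or_iff_right (fun h => hak h.symm)) rfl rfl]
      ring

-- one dict-insertion step shifts the sum over any nodup code list by an indicator
theorem sum_getD_insert (S : List Int) (hS : S.Nodup) (d : PySem.Dict Int Int) (k v : Int) :
    (S.map (fun c => (d.insert k (d.getD k 0 + v)).getD c 0)).sum
      = (S.map (fun c => d.getD c 0)).sum + (if k ∈ S then v else 0) := by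
  have hmap : (S.map (fun c => (d.insert k (d.getD k 0 + v)).getD c 0))
      = S.map (fun c => d.getD c 0 + if c = k then v else 0) := by
    apply List.map_congr_left
    intro c _
    by_cases hck : c = k
    · subst hck; simp [PySem.Dict.getD_insert_self]
    · simp [PySem.Dict.getD_insert_of_ne, hck]
  rw [hmap, sum_map_add_indicator S hS]

-- main invariant: A's filtered accumulation over OR equals B's dict sum, for any start dict
theorem fold_or_eq_dict_sum (S : List Int) (hS : S.Nodup) :
    ∀ (ORl : List (Int × Int × Int)) (d : PySem.Dict Int Int) (a : Int),
    ORl.foldl (fun t o => if o.2.1 ∈ S then t + o.2.2 else t) a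
        + (S.map (fun c => d.getD c 0)).sum
      = ((S.map (fun c => (ORl.foldl (fun d o => d.insert o.2.1 (d.getD o.2.1 0 + o.2.2)) d).getD c 0)).sum) + a := by
  intro ORl
  induction ORl with
  | nil => intro d a; simp [Int.add_comm]
  | cons o rest ih =>
    intro d a
    simp only [List.foldl_cons]
    have h1 := ih (d.insert o.2.1 (d.getD o.2.1 0 + o.2.2)) (if o.2.1 ∈ S then a + o.2.2 else a)
    rw [sum_getD_insert S hS d o.2.1 o.2.2] at h1
    by_cases h : o.2.1 ∈ S <;> simp only [h, if_pos, if_false] at h1 ⊢ <;> omega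

theorem spesa_totale_eq_alt (CL : List (Int × String)) (OR : List (Int × Int × Int)) (cognome : String) :
    spesa_totale CL OR cognome = spesa_totale_alt CL OR cognome := by
  unfold spesa_totale spesa_totale_alt
  simp only []
  rw [PySem.List.foldl_pyRange_zero_pyGetD' CL (0, "")
        (fun acc c => if PySem.Str.lower c.2 == PySem.Str.lower cognome then acc ++ [c.1] else acc) [],
      PySem.List.foldl_append_if (fun c => PySem.Str.lower c.2 == PySem.Str.lower cognome) (·.1) CL [],
      List.nil_append]
  set codes : List Int := (CL.filter (fun c => PySem.Str.lower c.2 == PySem.Str.lower cognome)).map (·.1) with hcodes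
  set S : List Int := PySem.Set.ofList codes with hSdef
  have hS : S.Nodup := PySem.Set.nodup_ofList codes
  rw [PySem.List.foldl_pyRange_zero_pyGetD' OR (0, 0, 0)
        (fun totale o => if codes.contains o.2.1 then totale + o.2.2 else totale) 0]
  have hcong : OR.foldl (fun t o => if codes.contains o.2.1 then t + o.2.2 else t) 0
      = OR.foldl (fun t o => if o.2.1 ∈ S then t + o.2.2 else t) 0 := by
    apply PySem.List.foldl_congr_mem
    intro t o _
    have hmem : codes.contains o.2.1 = decide (o.2.1 ∈ S) := by
      simp [hSdef, PySem.Set.mem_ofList]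
    rw [hmem]
    by_cases h : o.2.1 ∈ S <;> simp [h]
  rw [hcong]
  have := fold_or_eq_dict_sum S hS OR PySem.Dict.empty 0
  have h0 : (List.map (fun c => (PySem.Dict.empty : PySem.Dict Int Int).getD c 0) S).sum = 0 := by
    simp [pysem]
  omega

-- ===== VERDICT (by name: the statement is the Claim_ definition above) =====
theorem spesa_totale_spec : Claim_equal_spesa_totale := by
  intro CL OR cognome _
  unfold Spec_spesa_totale
  exact spesa_totale_eq_alt CL OR cognome
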